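-- pv_equiv track=rewrite | github.com/chanK39/chanK39 | 까치/만들기/#지금까지 나온 코드들을 순서대로 다 정렬해서 복사하기 쉽게 포커에서 내.py | get_possible_hands
-- ===== SOURCE A (Python) =====
-- import itertools
--
-- def get_possible_hands(my_cards, table_cards):
--     possible_hands = []
--     for i in range(len(table_cards)):
--         for j in range(i + 1, len(table_cards)):
--             possible_hand = my_cards + [table_cards[i], table_cards[j]]
--             possible_hands.append(possible_hand)
--     for i in range(3, len(table_cards) + 1):
--         for board in itertools.combinations(table_cards, i):
--             possible_hand = my_cards + list(board)
--             possible_hands.append(possible_hand)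
--     return possible_hands
-- ===== SOURCE B (Python) =====
-- def get_possible_hands(my_cards, table_cards):
--     possible_hands = []
--     layer = [(table_cards[i + 1:], [card]) for i, card in enumerate(table_cards)]
--     for _ in range(1, len(table_cards)):
--         nxt = []
--         for rest, combo in layer:
--             for idx, card in enumerate(rest):
--                 nxt.append((rest[idx + 1:], combo + [card]))
--         layer = nxt
--         for _, combo in layer:
--             possible_hands.append(my_cards + combo)
--     return possible_hands
-- ===== Notes on version B (the rewrite author's own statement) =====
-- stated objective: alternative
-- what changed: Replaces A's nested index-pair loop plus itertools.combinations phase with an incremental layer DP: keep (remaining-suffix, combo) states, extend each layer of size-k combinations into size-(k+1) by consuming the suffix, emitting hands layer by layer.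
import Mathlib
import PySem

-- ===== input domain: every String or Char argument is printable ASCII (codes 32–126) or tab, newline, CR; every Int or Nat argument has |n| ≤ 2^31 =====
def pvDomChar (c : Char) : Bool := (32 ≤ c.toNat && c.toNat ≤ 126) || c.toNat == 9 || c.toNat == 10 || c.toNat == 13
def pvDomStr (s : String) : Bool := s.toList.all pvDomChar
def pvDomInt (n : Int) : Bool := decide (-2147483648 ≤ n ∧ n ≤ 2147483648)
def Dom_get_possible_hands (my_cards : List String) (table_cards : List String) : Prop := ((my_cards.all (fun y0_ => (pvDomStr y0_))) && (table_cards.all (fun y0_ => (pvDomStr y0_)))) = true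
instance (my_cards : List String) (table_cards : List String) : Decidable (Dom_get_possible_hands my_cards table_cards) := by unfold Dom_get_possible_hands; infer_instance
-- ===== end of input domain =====

-- B replaces A's nested index-pair loop + itertools.combinations phase with an incremental
-- layer DP over (remaining-suffix, combo) states, growing combinations one card at a time
-- (objective: alternative, same cost).

-- ===== PORT A =====
-- A's nested index loops over range(len) with table_cards[i]/[j]: the indices produced by
-- range are always in bounds, so pyGetD's default is unreachable and the port is exact.
def get_possible_hands (my_cards : List String) (table_cards : List String) : List (List String) :=
  let n : Int := PySem.List.len table_cards
  let possible_hands : List (List String) :=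
    (PySem.List.pyRange 0 n).foldl (fun acc i =>
      (PySem.List.pyRange (i + 1) n).foldl (fun acc j =>
        acc ++ [my_cards ++ [PySem.List.pyGetD table_cards i "", PySem.List.pyGetD table_cards j ""]]) acc) []
  (PySem.List.pyRange 3 (n + 1)).foldl (fun acc i =>
    (PySem.List.combinations table_cards i.toNat).foldl (fun acc board =>
      acc ++ [my_cards ++ board]) acc) possible_hands

-- ===== PORT B =====
-- B's layer DP: states are (rest-of-table-after-last-pick, combo-so-far); each of the
-- len-1 loop turns extends every state by every card of its rest (enumerate + slice),
-- then emits my_cards ++ combo for the new layer.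
def get_possible_hands_alt (my_cards : List String) (table_cards : List String) : List (List String) :=
  let layer0 : List (List String × List String) :=
    (PySem.List.enumerate table_cards 0).map
      (fun p => (PySem.List.slice table_cards (some (p.1 + 1)) none, [p.2]))
  let st := (PySem.List.pyRange 1 (PySem.List.len table_cards)).foldl (fun st _ =>
    let nxt := st.2.foldl (fun nxt p =>
      (PySem.List.enumerate p.1 0).foldl (fun nxt q =>
        nxt ++ [(PySem.List.slice p.1 (some (q.1 + 1)) none, p.2 ++ [q.2])]) nxt) []
    (nxt.foldl (fun out p => out ++ [my_cards ++ p.2]) st.1, nxt))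
    (([] : List (List String)), layer0)
  st.1

-- ===== PRECONDITION & SPEC =====
def Spec_get_possible_hands (my_cards : List String) (table_cards : List String) (out : List (List String)) : Prop := out = get_possible_hands_alt my_cards table_cards
instance (my_cards : List String) (table_cards : List String) (out : List (List String)) : Decidable (Spec_get_possible_hands my_cards table_cards out) := by unfold Spec_get_possible_hands; infer_instance

-- ===== CLAIM (what is proved, stated in full; the proofs are below) =====
def Claim_equal_get_possible_hands : Prop := ∀ (my_cards : List String) (table_cards : List String), Dom_get_possible_hands my_cards table_cards → Spec_get_possible_hands my_cards table_cards (get_possible_hands my_cards table_cards)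

-- ===== LEMMAS AND PROOFS =====

-- One-step extension of a single (rest, combo) state, structurally.
def stepE : List String → List String → List (List String × List String)
  | [], _ => []
  | x :: xs, combo => (xs, combo ++ [x]) :: stepE xs combo

-- Combinations-with-rest: all k-extensions of (rest, combo), in B's layer order.
def cwr : Nat → List String → List String → List (List String × List String)
  | 0, rest, combo => [(rest, combo)]
  | _ + 1, [], _ => []
  | k + 1, x :: xs, combo => cwr k xs (combo ++ [x]) ++ cwr (k + 1) xs combo
termination_by k rest _ => (k, rest.length)

theorem stepE_eq_cwr_one (rest combo : List String) : stepE rest combo = cwr 1 rest combo := by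
  induction rest generalizing combo with
  | nil => simp [stepE, cwr]
  | cons x xs ih => simp [stepE, cwr, ih]

theorem flatMap_stepE_cwr (k : Nat) (rest combo : List String) :
    (cwr k rest combo).flatMap (fun p => stepE p.1 p.2) = cwr (k + 1) rest combo := by
  induction k generalizing rest combo with
  | zero => simp [cwr, stepE_eq_cwr_one]
  | succ k ihk =>
    induction rest generalizing combo with
    | nil => simp [cwr]
    | cons x xs ihr =>
      simp only [cwr]
      rw [List.flatMap_append, ihk, ihr]

theorem map_snd_cwr (k : Nat) (rest combo : List String) :
    (cwr k rest combo).map Prod.snd = (PySem.List.combinations rest k).map (combo ++ ·) := by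
  induction k generalizing rest combo with
  | zero => simp [cwr, PySem.List.combinations_zero]
  | succ k ihk =>
    induction rest generalizing combo with
    | nil => simp [cwr, PySem.List.combinations_nil_succ]
    | cons x xs ihr =>
      simp only [cwr]
      rw [List.map_append, ihk, ihr, PySem.List.combinations_cons_succ, List.map_append,
        List.map_map]
      simp [Function.comp]

-- The enumerate+slice extension of a suffix, with the global list split as pre ++ suf,
-- is exactly stepE on the suffix.
theorem enumerate_slice_eq_stepE (suf : List String) :
    ∀ (pre combo : List String),
    (PySem.List.enumerate suf (pre.length : Int)).map
      (fun q => (PySem.List.slice (pre ++ suf) (some (q.1 + 1)) none, combo ++ [q.2]))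
    = stepE suf combo := by
  induction suf with
  | nil => intro pre combo; simp [PySem.List.enumerate_nil, stepE]
  | cons x xs ih =>
    intro pre combo
    rw [PySem.List.enumerate_cons, List.map_cons]
    have h2 : PySem.List.slice (pre ++ x :: xs) (some ((pre.length : Int) + 1)) none = xs := by
      rw [show ((pre.length : Int) + 1) = ((pre.length + 1 : Nat) : Int) by push_cast; ring,
        PySem.List.slice_from_natCast, show pre ++ x :: xs = (pre ++ [x]) ++ xs by simp,
        List.drop_append_of_le_length (by simp)]
      simp
    have h5 := ih (pre ++ [x]) combo
    simp only [List.append_assoc, List.singleton_append, List.length_append, List.length_cons,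
      List.length_nil] at h5
    push_cast at h5
    rw [h2, h5]
    simp [stepE]

theorem enumerate_slice_eq_stepE' (l combo : List String) :
    (PySem.List.enumerate l 0).map
      (fun q => (PySem.List.slice l (some (q.1 + 1)) none, combo ++ [q.2]))
    = stepE l combo := by
  have := enumerate_slice_eq_stepE l [] combo
  simpa using this

-- The abstract loop body of B.
def bodyG (my : List String) (st : List (List String) × List (List String × List String)) :
    List (List String) × List (List String × List String) :=
  let nxt := st.2.flatMap (fun p => stepE p.1 p.2)
  (st.1 ++ nxt.map (fun p => my ++ p.2), nxt)

theorem foldl_const_iterate {α β : Type} (g : α → α) (l : List β) :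
    ∀ s : α, l.foldl (fun s _ => g s) s = g^[l.length] s := by
  induction l with
  | nil => intro s; rfl
  | cons x xs ih =>
    intro s
    rw [List.foldl_cons, ih, List.length_cons, Function.iterate_succ_apply]

theorem bodyG_iterate (my tc : List String) (t : Nat) :
    (bodyG my)^[t] ([], cwr 1 tc []) =
      ((List.range' 2 t).flatMap (fun k => (PySem.List.combinations tc k).map (my ++ ·)),
       cwr (t + 1) tc []) := by
  induction t with
  | zero => simp
  | succ t ih =>
    rw [Function.iterate_succ_apply', ih]
    unfold bodyG
    rw [flatMap_stepE_cwr]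
    have hmap : (cwr (t + 1 + 1) tc []).map (fun p => my ++ p.2)
        = (PySem.List.combinations tc (t + 2)).map (my ++ ·) := by
      have := map_snd_cwr (t + 2) tc []
      calc (cwr (t + 1 + 1) tc []).map (fun p => my ++ p.2)
          = ((cwr (t + 2) tc []).map Prod.snd).map (my ++ ·) := by
            rw [List.map_map]; rfl
        _ = ((PySem.List.combinations tc (t + 2)).map (([] : List String) ++ ·)).map (my ++ ·) := by
            rw [this]
        _ = (PySem.List.combinations tc (t + 2)).map (my ++ ·) := by
            simp
    rw [List.range'_concat, show 2 + 1 * t = t + 2 from by omega]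
    simp only [List.flatMap_append, List.flatMap_cons, List.flatMap_nil, List.append_nil]
    rw [hmap]

-- B computes the concatenation, over sizes 2..n, of the size-k combinations prefixed by my.
theorem alt_eq_flat (my tc : List String) :
    get_possible_hands_alt my tc =
      (List.range' 2 (tc.length - 1)).flatMap
        (fun k => (PySem.List.combinations tc k).map (my ++ ·)) := by
  unfold get_possible_hands_alt
  simp only []
  have hlayer0 : (PySem.List.enumerate tc 0).map
      (fun p => (PySem.List.slice tc (some (p.1 + 1)) none, [p.2])) = cwr 1 tc [] := by
    rw [← stepE_eq_cwr_one, ← enumerate_slice_eq_stepE' tc []]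
    simp
  rw [hlayer0]
  have hbody : ∀ (st : List (List String) × List (List String × List String)) (i : Int),
      (fun st (_ : Int) =>
        let nxt := st.2.foldl (fun nxt p =>
          (PySem.List.enumerate p.1 0).foldl (fun nxt q =>
            nxt ++ [(PySem.List.slice p.1 (some (q.1 + 1)) none, p.2 ++ [q.2])]) nxt) []
        (nxt.foldl (fun out p => out ++ [my ++ p.2]) st.1, nxt)) st i = bodyG my st := by
    intro st i
    have hnxt : st.2.foldl (fun nxt p =>
        (PySem.List.enumerate p.1 0).foldl (fun nxt q =>
          nxt ++ [(PySem.List.slice p.1 (some (q.1 + 1)) none, p.2 ++ [q.2])]) nxt) []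
        = st.2.flatMap (fun p => stepE p.1 p.2) := by
      rw [PySem.List.foldl_congr_mem _ _ (fun acc p => acc ++ stepE p.1 p.2) _
        (by
          intro acc p _
          rw [PySem.List.foldl_append_singleton_eq_map
            (fun q => (PySem.List.slice p.1 (some (q.1 + 1)) none, p.2 ++ [q.2]))
            (PySem.List.enumerate p.1 0) acc]
          rw [enumerate_slice_eq_stepE' p.1 p.2])]
      rw [PySem.List.foldl_append_eq_flatMap, List.nil_append]
    simp only []
    rw [hnxt, PySem.List.foldl_append_singleton_eq_map]
    rfl
  rw [PySem.List.foldl_congr_mem _ _ (fun st (_ : Int) => bodyG my st) _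
    (fun st i _ => hbody st i)]
  rw [foldl_const_iterate (bodyG my) (PySem.List.pyRange 1 (PySem.List.len tc))]
  rw [PySem.List.len_eq, PySem.List.length_pyRange_one]
  have hlen : ((tc.length : Int) - 1).toNat = tc.length - 1 := by omega
  rw [hlen, bodyG_iterate my tc (tc.length - 1)]

-- A's i<j index-pair enumeration, re-expressed structurally, is exactly the
-- size-2 combinations of table_cards (each prefixed with my_cards).
theorem pairs_flatMap (my : List String) (tc : List String) :
    (List.range tc.length).flatMap
      (fun k => (tc.drop (k + 1)).map (fun y => my ++ [tc.getD k "", y]))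
    = (PySem.List.combinations tc 2).map (fun b => my ++ b) := by
  induction tc with
  | nil => simp
  | cons x xs ih =>
    rw [List.length_cons, List.range_succ_eq_map]
    simp only [List.flatMap_cons, List.flatMap_map]
    rw [show (PySem.List.combinations (x :: xs) 2)
          = (PySem.List.combinations xs 1).map (x :: ·) ++ PySem.List.combinations xs 2 from
        PySem.List.combinations_cons_succ x xs 1,
      PySem.List.combinations_one]
    simp only [List.map_append, List.map_map]
    rw [← ih]
    simp [Function.comp, Nat.succ_eq_add_one]

-- A's first phase (the nested index loops) computes the size-2 combinations pass.
theorem phase1_eq (my tc : List String) :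
    (PySem.List.pyRange 0 (PySem.List.len tc)).foldl (fun acc i =>
      (PySem.List.pyRange (i + 1) (PySem.List.len tc)).foldl (fun acc j =>
        acc ++ [my ++ [PySem.List.pyGetD tc i "", PySem.List.pyGetD tc j ""]]) acc) []
    = (PySem.List.combinations tc 2).map (fun b => my ++ b) := by
  rw [PySem.List.foldl_congr_mem _ _
      (fun acc i => acc ++ ((tc.drop (i + 1).toNat).map
        (fun y => my ++ [PySem.List.pyGetD tc i "", y]))) _
      (by
        intro acc i hi
        have h0 : (0 : Int) ≤ i := ((PySem.List.mem_pyRange_one).1 hi).1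
        rw [PySem.List.foldl_pyRange_pyGetD tc "" (fun acc y => acc ++ [my ++ [PySem.List.pyGetD tc i "", y]]) acc (by omega),
          PySem.List.foldl_append_singleton_eq_map])]
  rw [PySem.List.foldl_append_eq_flatMap, List.nil_append,
    PySem.List.len_eq, PySem.List.pyRange_zero_natCast, List.flatMap_map]
  rw [← pairs_flatMap my tc]
  refine List.flatMap_congr ?_
  intro k _
  have h1 : ((k : Int) + 1).toNat = k + 1 := by omega
  rw [h1, PySem.List.pyGetD_natCast]

-- A also computes the concatenation over sizes 2..n.
theorem a_eq_flat (my tc : List String) :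
    get_possible_hands my tc =
      (List.range' 2 (tc.length - 1)).flatMap
        (fun k => (PySem.List.combinations tc k).map (my ++ ·)) := by
  unfold get_possible_hands
  simp only []
  rw [phase1_eq my tc]
  rw [PySem.List.foldl_congr_mem _ _
      (fun acc i => acc ++ (PySem.List.combinations tc i.toNat).map (my ++ ·)) _
      (by
        intro acc i _
        rw [PySem.List.foldl_append_singleton_eq_map])]
  rw [PySem.List.foldl_append_eq_flatMap, PySem.List.len_eq]
  by_cases h : 2 ≤ tc.length
  · have hsplit : tc.length - 1 = (tc.length - 2) + 1 := by omega
    rw [hsplit, List.range'_succ, List.flatMap_cons]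
    congr 1
    rw [PySem.List.pyRange_one]
    have hto : (((tc.length : Int) + 1) - 3).toNat = tc.length - 2 := by omega
    rw [hto, List.flatMap_map, List.range'_eq_map_range, List.flatMap_map]
    refine List.flatMap_congr ?_
    intro k _
    have : ((3 : Int) + (k : Int)).toNat = 3 + k := by omega
    rw [this]
  · rw [PySem.List.pyRange_one_eq_nil (by omega),
      PySem.List.combinations_eq_nil_of_length_lt tc (by omega)]
    have : tc.length - 1 = 0 := by omega
    simp [this]

theorem main_eq (my tc : List String) :
    get_possible_hands my tc = get_possible_hands_alt my tc := by
  rw [a_eq_flat, alt_eq_flat]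

-- ===== VERDICT (by name: the statement is the Claim_ definition above) =====
theorem get_possible_hands_spec : Claim_equal_get_possible_hands := by
  intro my tc _
  exact main_eq my tc
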